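-- pv_equiv track=rewrite | github.com/theinvestlog-creator/tools-jules | backend/util/io_safe.py | merge_incremental
-- ===== SOURCE A (Python) =====
-- from typing import Dict, List, Union
--
-- def merge_incremental(existing_rows: List[Dict[str, str]], new_rows: List[Dict[str, str]]) -> List[Dict[str, str]]:
--     """
--     Merges new rows into an existing list of rows, overwriting the last 5 trading days.
--     """
--     if not new_rows:
--         return existing_rows
--
--     merged_dict = {row["date"]: row for row in existing_rows}
--     new_rows_dict = {row["date"]: row for row in new_rows}
--
--     # Overwrite last 5 trading days from existing rows with new data
--     if existing_rows:
--         last_five_dates = sorted([row["date"] for row in existing_rows])[-5:]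
--         for date in last_five_dates:
--             if date in new_rows_dict:
--                 merged_dict[date] = new_rows_dict[date]
--
--     # Add new rows
--     merged_dict.update(new_rows_dict)
--
--     merged_list = sorted(merged_dict.values(), key=lambda x: x["date"])
--     return merged_list
-- ===== SOURCE B (Python) =====
-- from typing import Dict, List
--
-- def merge_incremental(existing_rows: List[Dict[str, str]], new_rows: List[Dict[str, str]]) -> List[Dict[str, str]]:
--     """Same merge via stable sort + one-pass last-wins collapse of equal-date runs."""
--     if not new_rows:
--         return existing_rows
--     combined = sorted(existing_rows + new_rows, key=lambda r: r["date"])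
--     out: List[Dict[str, str]] = []
--     for row in combined:
--         if out and out[-1]["date"] == row["date"]:
--             out[-1] = row
--         else:
--             out.append(row)
--     return out
-- ===== Notes on version B (the rewrite author's own statement) =====
-- stated objective: idiomatic
-- what changed: A builds two date-keyed dicts, runs a redundant last-five-dates overwrite loop, merges with dict.update and sorts the values; B simply stable-sorts existing+new by date and collapses runs of equal dates in one pass keeping the last row (new rows win).
import Mathlib
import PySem

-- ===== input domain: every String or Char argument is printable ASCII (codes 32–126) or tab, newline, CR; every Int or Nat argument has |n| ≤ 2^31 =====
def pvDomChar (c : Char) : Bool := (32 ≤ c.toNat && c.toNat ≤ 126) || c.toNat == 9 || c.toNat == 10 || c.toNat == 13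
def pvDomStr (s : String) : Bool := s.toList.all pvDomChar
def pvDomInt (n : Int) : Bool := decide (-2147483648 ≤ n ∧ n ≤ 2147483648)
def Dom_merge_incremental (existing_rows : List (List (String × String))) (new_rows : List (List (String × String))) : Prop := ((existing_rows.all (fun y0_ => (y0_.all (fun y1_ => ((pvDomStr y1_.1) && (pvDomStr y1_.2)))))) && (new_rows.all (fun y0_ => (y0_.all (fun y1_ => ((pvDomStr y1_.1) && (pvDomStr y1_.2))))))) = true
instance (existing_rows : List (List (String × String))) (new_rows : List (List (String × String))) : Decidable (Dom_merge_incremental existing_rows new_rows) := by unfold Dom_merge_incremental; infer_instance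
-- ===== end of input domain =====

-- B replaces A's three-dict pipeline (two date-keyed dicts, a redundant last-five overwrite loop, dict.update, final sort)
-- by one stable sort of existing+new followed by a single pass collapsing equal-date runs keeping the last row (idiomatic, same cost).

-- ===== PORT A =====
-- row["date"] (rows are Python dicts = assoc lists; Pre_ guarantees the key exists where A reads it)
def pvRowDate (r : List (String × String)) : String := ((PySem.Dict.mk r).get? "date").getD ""

-- {row["date"]: row for row in xs}
def pvBuildDict (xs : List (List (String × String))) : PySem.Dict String (List (String × String)) :=
  xs.foldl (fun d r => d.insert (pvRowDate r) r) PySem.Dict.empty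

-- the `if existing_rows:` block: last_five_dates loop overwriting merged_dict from new_rows_dict
def pvOverwriteLastFive (md nd : PySem.Dict String (List (String × String)))
    (existing_rows : List (List (String × String))) : PySem.Dict String (List (String × String)) :=
  if existing_rows = [] then md
  else
    (PySem.List.slice (PySem.List.sorted (existing_rows.map (fun r => pvRowDate r)) (fun x => x) false) (some (-5)) none).foldl
      (fun d date => if nd.contains date then d.insert date (nd.getD date []) else d) md

def merge_incremental (existing_rows : List (List (String × String))) (new_rows : List (List (String × String))) : List (List (String × String)) :=
  if new_rows = [] then existing_rows
  else
    let merged_dict := pvBuildDict existing_rows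
    let new_rows_dict := pvBuildDict new_rows
    let merged_dict2 := pvOverwriteLastFive merged_dict new_rows_dict existing_rows
    let final := merged_dict2.update new_rows_dict.items
    PySem.List.sorted final.values (fun r => pvRowDate r) false

-- ===== PORT B =====
-- the loop `if out and out[-1]["date"] == row["date"]: out[-1] = row else: out.append(row)`:
-- out[-1] is always the previously processed row, so each row is compared with its predecessor
def pvCollapse : List (List (String × String)) → List (List (String × String))
  | [] => []
  | [r] => [r]
  | r :: r2 :: t => if pvRowDate r == pvRowDate r2 then pvCollapse (r2 :: t) else r :: pvCollapse (r2 :: t)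

def merge_incremental_alt (existing_rows : List (List (String × String))) (new_rows : List (List (String × String))) : List (List (String × String)) :=
  if new_rows = [] then existing_rows
  else pvCollapse (PySem.List.sorted (existing_rows ++ new_rows) (fun r => pvRowDate r) false)

-- ===== PRECONDITION & SPEC =====
-- Pre_ excludes (a) rows with duplicate keys, which do not represent a Python dict argument at all,
-- and (b) inputs where some row lacks the "date" key while new_rows is nonempty: there A raises KeyError.
def Pre_merge_incremental (existing_rows : List (List (String × String))) (new_rows : List (List (String × String))) : Prop :=
  (∀ r ∈ existing_rows ++ new_rows, (r.map Prod.fst).Nodup) ∧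
  (new_rows ≠ [] → ∀ r ∈ existing_rows ++ new_rows, ((PySem.Dict.mk r).get? "date").isSome = true)
instance (existing_rows : List (List (String × String))) (new_rows : List (List (String × String))) : Decidable (Pre_merge_incremental existing_rows new_rows) := by unfold Pre_merge_incremental; infer_instance

def pvWitness_merge_incremental : (List (List (String × String))) × (List (List (String × String))) :=
  ([[("date", "2024-01-01"), ("close", "10")]], [[("date", "2024-01-02"), ("close", "11")]])

def Spec_merge_incremental (existing_rows : List (List (String × String))) (new_rows : List (List (String × String))) (out : List (List (String × String))) : Prop := out = merge_incremental_alt existing_rows new_rows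
instance (existing_rows : List (List (String × String))) (new_rows : List (List (String × String))) (out : List (List (String × String))) : Decidable (Spec_merge_incremental existing_rows new_rows out) := by unfold Spec_merge_incremental; infer_instance

-- ===== CLAIM (what is proved, stated in full; the proofs are below) =====
def Claim_equal_merge_incremental : Prop := ∀ (existing_rows : List (List (String × String))) (new_rows : List (List (String × String))), Dom_merge_incremental existing_rows new_rows → Pre_merge_incremental existing_rows new_rows → Spec_merge_incremental existing_rows new_rows (merge_incremental existing_rows new_rows)

-- ===== LEMMAS AND PROOFS =====

-- the last row of xs whose date is k (both pipelines reduce to this map)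
def pvLastO : List (List (String × String)) → String → Option (List (String × String))
  | [], _ => none
  | r :: t, k => match pvLastO t k with
    | some x => some x
    | none => if pvRowDate r == k then some r else none

-- the last value of an assoc list at key k
def pvLastP : List (String × List (String × String)) → String → Option (List (String × String))
  | [], _ => none
  | p :: t, k => match pvLastP t k with
    | some x => some x
    | none => if p.1 == k then some p.2 else none

theorem pvLastO_mem {xs : List (List (String × String))} {k : String} {r : List (String × String)}
    (h : pvLastO xs k = some r) : r ∈ xs ∧ pvRowDate r = k := by
  induction xs with
  | nil => simp [pvLastO] at h
  | cons a t ih =>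
    rw [pvLastO] at h
    rcases hm : pvLastO t k with _ | x
    · rw [hm] at h
      simp only at h
      split_ifs at h with hd
      cases h
      exact ⟨List.mem_cons_self, by simpa using hd⟩
    · rw [hm] at h
      simp only [Option.some.injEq] at h
      cases h
      obtain ⟨h1, h2⟩ := ih hm
      exact ⟨List.mem_cons_of_mem _ h1, h2⟩

theorem pvLastO_none_iff {xs : List (List (String × String))} {k : String} :
    pvLastO xs k = none ↔ k ∉ xs.map pvRowDate := by
  induction xs with
  | nil => simp [pvLastO]
  | cons a t ih =>
    rw [pvLastO]
    rcases hm : pvLastO t k with _ | x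
    · rw [hm] at ih
      by_cases hd : pvRowDate a = k
      · simp [hd]
      · constructor
        · intro _
          simp only [List.map_cons, List.mem_cons]
          rintro (h1 | h2)
          · exact hd h1.symm
          · exact ih.mp rfl h2
        · intro _
          simp [hd]
    · have hx : k ∈ t.map pvRowDate := by
        by_contra hc
        rw [← ih] at hc
        rw [hm] at hc
        cases hc
      simp [hx]

theorem pvLastO_append (xs ys : List (List (String × String))) (k : String) :
    pvLastO (xs ++ ys) k = match pvLastO ys k with
      | some x => some x
      | none => pvLastO xs k := by
  induction xs with
  | nil => cases hm : pvLastO ys k <;> simp [pvLastO, hm]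
  | cons a t ih =>
    rw [List.cons_append, pvLastO, ih, pvLastO]
    cases pvLastO ys k <;> cases pvLastO t k <;> simp

theorem pvLastO_cons (r : List (String × String)) (t : List (List (String × String))) (k : String) :
    pvLastO (r :: t) k = match pvLastO t k with
      | some x => some x
      | none => if pvRowDate r == k then some r else none := rfl

-- get? after the dict-building fold = last matching row
theorem pv_get?_buildFold (xs : List (List (String × String)))
    (d : PySem.Dict String (List (String × String))) (k : String) :
    ((xs.foldl (fun d r => d.insert (pvRowDate r) r) d).get? k) =
      match pvLastO xs k with
      | some r => some r
      | none => d.get? k := by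
  induction xs generalizing d with
  | nil => simp [pvLastO]
  | cons a t ih =>
    simp only [List.foldl_cons, pvLastO, ih]
    rcases pvLastO t k with _ | x
    · rw [PySem.Dict.get?_insert]
      by_cases hk : k = pvRowDate a
      · simp [hk]
      · simp [hk, Ne.symm hk]
    · simp

-- get? after the update fold = last matching pair
theorem pv_get?_updateFold (ps : List (String × List (String × String)))
    (d : PySem.Dict String (List (String × String))) (k : String) :
    ((ps.foldl (fun a p => a.insert p.1 p.2) d).get? k) =
      match pvLastP ps k with
      | some v => some v
      | none => d.get? k := by
  induction ps generalizing d with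
  | nil => simp [pvLastP]
  | cons a t ih =>
    simp only [List.foldl_cons, pvLastP, ih]
    rcases pvLastP t k with _ | x
    · rw [PySem.Dict.get?_insert]
      by_cases hk : k = a.1
      · simp [hk]
      · simp [hk, Ne.symm hk]
    · simp

theorem pvLastP_none_iff {ps : List (String × List (String × String))} {k : String} :
    pvLastP ps k = none ↔ k ∉ ps.map Prod.fst := by
  induction ps with
  | nil => simp [pvLastP]
  | cons a t ih =>
    rw [pvLastP]
    rcases hm : pvLastP t k with _ | x
    · rw [hm] at ih
      by_cases hd : a.1 = k
      · simp [hd]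
      · constructor
        · intro _
          simp only [List.map_cons, List.mem_cons]
          rintro (h1 | h2)
          · exact hd h1.symm
          · exact ih.mp rfl h2
        · intro _
          simp [hd]
    · have hx : k ∈ t.map Prod.fst := by
        by_contra hc
        rw [← ih] at hc
        rw [hm] at hc
        cases hc
      simp [hx]

-- on a nodup assoc list, last match = first match
theorem pvLastP_eq_find? (ps : List (String × List (String × String)))
    (h : (ps.map Prod.fst).Nodup) (k : String) :
    pvLastP ps k = (ps.find? (fun p => p.1 == k)).map Prod.snd := by
  induction ps with
  | nil => simp [pvLastP]
  | cons a t ih =>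
    simp only [List.map_cons, List.nodup_cons] at h
    simp only [pvLastP, List.find?]
    by_cases hd : a.1 = k
    · have ht : pvLastP t k = none := pvLastP_none_iff.mpr (by rw [hd] at h; exact h.1)
      rw [ht]; simp [hd]
    · rw [ih h.2]
      have : (a.1 == k) = false := by simp [hd]
      rw [this]
      cases (t.find? (fun p => p.1 == k)).map Prod.snd <;> simp

-- the five-date overwrite loop does not change get? at keys absent from nd
theorem pv_get?_fiveLoop (dates : List String) (nd : PySem.Dict String (List (String × String)))
    (md : PySem.Dict String (List (String × String))) (k : String) (hk : nd.contains k = false) :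
    ((dates.foldl (fun d date => if nd.contains date then d.insert date (nd.getD date []) else d) md).get? k) = md.get? k := by
  induction dates generalizing md with
  | nil => rfl
  | cons a t ih =>
    simp only [List.foldl_cons]
    rw [ih]
    split_ifs with hc
    · rw [PySem.Dict.get?_insert, if_neg]; intro he; rw [he] at hk; rw [hk] at hc; cases hc
    · rfl

-- the five-date overwrite loop keeps keys Nodup and (for dates already present) unchanged as a set
theorem pv_nodup_fiveLoop (dates : List String) (nd md : PySem.Dict String (List (String × String)))
    (h : md.keys.Nodup) :
    ((dates.foldl (fun d date => if nd.contains date then d.insert date (nd.getD date []) else d) md).keys).Nodup := by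
  induction dates generalizing md with
  | nil => exact h
  | cons a t ih =>
    simp only [List.foldl_cons]
    apply ih
    split_ifs
    · exact PySem.Dict.nodup_keys_insert _ _ _ h
    · exact h

theorem pv_nodup_keys_buildDict (xs : List (List (String × String))) :
    (pvBuildDict xs).keys.Nodup := by
  unfold pvBuildDict
  exact PySem.Dict.nodup_keys_foldl_insert_key xs pvRowDate (fun _ r => r) PySem.Dict.empty
    (by simp [PySem.Dict.keys, PySem.Dict.empty])

theorem pv_get?_buildDict (xs : List (List (String × String))) (k : String) :
    (pvBuildDict xs).get? k = pvLastO xs k := by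
  unfold pvBuildDict
  rw [pv_get?_buildFold]
  cases pvLastO xs k <;> simp [PySem.Dict.get?_empty]

-- pvLastP on a dict's items is its get?
theorem pvLastP_items (d : PySem.Dict String (List (String × String))) (h : d.keys.Nodup) (k : String) :
    pvLastP d.items k = d.get? k := by
  rw [pvLastP_eq_find? d.items h k]
  rfl

-- the final dict of port A looks up the last row of existing ++ new with the given date
theorem pv_get?_final (e n : List (List (String × String))) (k : String) :
    (((pvOverwriteLastFive (pvBuildDict e) (pvBuildDict n) e).update (pvBuildDict n).items).get? k)
      = pvLastO (e ++ n) k := by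
  have hnd : (pvBuildDict n).keys.Nodup := pv_nodup_keys_buildDict n
  rw [PySem.Dict.update, pv_get?_updateFold, pvLastP_items _ hnd, pv_get?_buildDict,
    pvLastO_append]
  rcases hm : pvLastO n k with _ | x
  · have hc : (pvBuildDict n).contains k = false := by
      have : (pvBuildDict n).get? k = none := by rw [pv_get?_buildDict, hm]
      rw [PySem.Dict.contains_eq_decide_mem_keys]
      simp [(PySem.Dict.get?_eq_none_iff_not_mem_keys _ _).mp this]
    unfold pvOverwriteLastFive
    split_ifs with he
    · rw [pv_get?_buildDict]
    · rw [pv_get?_fiveLoop _ _ _ _ hc, pv_get?_buildDict]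
  · rfl

theorem pv_nodup_keys_final (e n : List (List (String × String))) :
    (((pvOverwriteLastFive (pvBuildDict e) (pvBuildDict n) e).update (pvBuildDict n).items).keys).Nodup := by
  apply PySem.Dict.nodup_keys_update
  unfold pvOverwriteLastFive
  split_ifs with he
  · exact pv_nodup_keys_buildDict e
  · exact pv_nodup_fiveLoop _ _ _ (pv_nodup_keys_buildDict e)

-- membership in the final dict's values
theorem pv_mem_values_final (e n : List (List (String × String))) (v : List (String × String)) :
    v ∈ ((pvOverwriteLastFive (pvBuildDict e) (pvBuildDict n) e).update (pvBuildDict n).items).values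
      ↔ pvLastO (e ++ n) (pvRowDate v) = some v := by
  have hnd := pv_nodup_keys_final e n
  rw [PySem.Dict.values_eq_map_keys _ hnd []]
  constructor
  · intro hv
    obtain ⟨k, hk, hval⟩ := List.mem_map.mp hv
    have hne : ¬ (_ : PySem.Dict _ _).get? k = none :=
      fun h => (PySem.Dict.get?_eq_none_iff_not_mem_keys _ _).mp h hk
    rcases hg : ((pvOverwriteLastFive (pvBuildDict e) (pvBuildDict n) e).update (pvBuildDict n).items).get? k with _ | w
    · exact absurd hg hne
    · have hw : pvLastO (e ++ n) k = some w := by rw [← pv_get?_final, hg]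
      have hkey := (pvLastO_mem hw).2
      have : v = w := by
        rw [← hval, PySem.Dict.getD_eq_get?_getD, hg]
        rfl
      rw [this, hkey]
      exact hw
  · intro hv
    have hg : ((pvOverwriteLastFive (pvBuildDict e) (pvBuildDict n) e).update (pvBuildDict n).items).get? (pvRowDate v) = some v := by
      rw [pv_get?_final]; exact hv
    have hk : pvRowDate v ∈ ((pvOverwriteLastFive (pvBuildDict e) (pvBuildDict n) e).update (pvBuildDict n).items).keys := by
      by_contra hc
      rw [← PySem.Dict.get?_eq_none_iff_not_mem_keys] at hc
      rw [hc] at hg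
      cases hg
    refine List.mem_map.mpr ⟨pvRowDate v, hk, ?_⟩
    rw [PySem.Dict.getD_eq_get?_getD, hg]
    rfl

-- ===== B-side lemmas =====
theorem pv_collapse_subset (s : List (List (String × String))) (x : List (String × String)) :
    x ∈ pvCollapse s → x ∈ s := by
  induction s using pvCollapse.induct with
  | case1 => intro h; simpa [pvCollapse] using h
  | case2 r => intro h; simpa [pvCollapse] using h
  | case3 r r2 t hc ih =>
    intro h
    rw [pvCollapse, if_pos hc] at h
    exact List.mem_cons_of_mem _ (ih h)
  | case4 r r2 t hc ih =>
    intro h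
    rw [pvCollapse, if_neg hc] at h
    rcases List.mem_cons.mp h with h | h
    · exact h ▸ List.mem_cons_self
    · exact List.mem_cons_of_mem _ (ih h)

theorem pv_head_lt {r r2 : List (String × String)} {t : List (List (String × String))}
    (h : (r :: r2 :: t).Pairwise (fun a b => pvRowDate a ≤ pvRowDate b))
    (hne : pvRowDate r ≠ pvRowDate r2) :
    ∀ y ∈ r2 :: t, pvRowDate r < pvRowDate y := by
  intro y hy
  have h1 : pvRowDate r ≤ pvRowDate r2 := (List.pairwise_cons.mp h).1 r2 List.mem_cons_self
  have hlt : pvRowDate r < pvRowDate r2 := lt_of_le_of_ne h1 hne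
  rcases List.mem_cons.mp hy with hy | hy
  · exact hy ▸ hlt
  · exact lt_of_lt_of_le hlt ((List.pairwise_cons.mp (List.pairwise_cons.mp h).2).1 y hy)

theorem pv_collapse_pairwise (s : List (List (String × String))) :
    s.Pairwise (fun a b => pvRowDate a ≤ pvRowDate b) →
    (pvCollapse s).Pairwise (fun a b => pvRowDate a < pvRowDate b) := by
  induction s using pvCollapse.induct with
  | case1 => intro _; simp [pvCollapse]
  | case2 r => intro _; simp [pvCollapse]
  | case3 r r2 t hc ih =>
    intro h
    rw [pvCollapse, if_pos hc]
    exact ih (List.pairwise_cons.mp h).2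
  | case4 r r2 t hc ih =>
    intro h
    rw [pvCollapse, if_neg hc]
    refine List.pairwise_cons.mpr ⟨?_, ih (List.pairwise_cons.mp h).2⟩
    intro y hy
    exact pv_head_lt h (by simpa using hc) y (pv_collapse_subset _ y hy)

theorem pv_mem_collapse (s : List (List (String × String))) (x : List (String × String)) :
    s.Pairwise (fun a b => pvRowDate a ≤ pvRowDate b) →
    (x ∈ pvCollapse s ↔ pvLastO s (pvRowDate x) = some x) := by
  induction s using pvCollapse.induct with
  | case1 => intro _; simp [pvCollapse, pvLastO]
  | case2 r =>
    intro _
    rw [pvCollapse]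
    simp only [List.mem_singleton]
    constructor
    · rintro rfl; simp [pvLastO]
    · intro h
      simp only [pvLastO] at h
      split_ifs at h with hd
      · cases h; rfl
  | case3 r r2 t hc ih =>
    intro h
    rw [pvCollapse, if_pos hc, ih (List.pairwise_cons.mp h).2, pvLastO_cons r (r2 :: t)]
    rcases hm : pvLastO (r2 :: t) (pvRowDate x) with _ | y
    · simp only
      constructor
      · intro h'; cases h'
      · intro h'
        split_ifs at h' with hd
        · exfalso
          apply pvLastO_none_iff.mp hm
          simp only [List.map_cons, List.mem_cons]
          left
          rw [← beq_iff_eq.mp hd, ← beq_iff_eq.mp hc]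
    · simp
  | case4 r r2 t hc ih =>
    intro h
    rw [pvCollapse, if_neg hc]
    have hlt := pv_head_lt h (by simpa using hc)
    rw [pvLastO_cons r (r2 :: t)]
    constructor
    · intro hx
      rcases List.mem_cons.mp hx with rfl | hx
      · have hnone : pvLastO (r2 :: t) (pvRowDate x) = none := by
          apply pvLastO_none_iff.mpr
          intro hmem
          obtain ⟨y, hy, hky⟩ := List.mem_map.mp hmem
          exact absurd (hky ▸ hlt y hy) (lt_irrefl _)
        rw [hnone]
        simp
      · rw [(ih (List.pairwise_cons.mp h).2).mp hx]
    · intro hx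
      rcases hm : pvLastO (r2 :: t) (pvRowDate x) with _ | y
      · rw [hm] at hx
        simp only at hx
        split_ifs at hx with hd
        · cases hx
          exact List.mem_cons_self
      · rw [hm] at hx
        simp only [Option.some.injEq] at hx
        cases hx
        exact List.mem_cons_of_mem _ ((ih (List.pairwise_cons.mp h).2).mpr hm)

-- stability of the sort: the subsequence of rows with a fixed date is unchanged
theorem pv_filter_insertBy (x : List (String × String)) (ys : List (List (String × String))) (k : String)
    (h : ys.Pairwise (fun a b => pvRowDate a ≤ pvRowDate b)) :
    (PySem.List.insertBy (fun a b => decide (pvRowDate a < pvRowDate b)) x ys).filter (fun r => pvRowDate r == k)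
      = ys.filter (fun r => pvRowDate r == k) ++ (if pvRowDate x == k then [x] else []) := by
  induction ys with
  | nil =>
    simp only [PySem.List.insertBy, List.filter_nil, List.nil_append]
    split_ifs with hd <;> simp [hd]
  | cons y t ih =>
    rw [PySem.List.insertBy]
    obtain ⟨hy, ht⟩ := List.pairwise_cons.mp h
    by_cases hlt : (decide (pvRowDate x < pvRowDate y) : Bool) = true
    · rw [if_pos hlt]
      simp only [decide_eq_true_eq] at hlt
      by_cases hd : (pvRowDate x == k) = true
      · have hk := beq_iff_eq.mp hd
        have hnil : List.filter (fun r => pvRowDate r == k) (y :: t) = [] := by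
          apply List.filter_eq_nil_iff.mpr
          intro z hz
          simp only [beq_iff_eq]
          intro he
          have hzgt : pvRowDate x < pvRowDate z := by
            rcases List.mem_cons.mp hz with rfl | hz
            · exact hlt
            · exact lt_of_lt_of_le hlt (hy z hz)
          rw [hk, he] at hzgt
          exact lt_irrefl _ hzgt
        rw [List.filter_cons, if_pos hd, hnil]
        simp [hd]
      · rw [List.filter_cons, if_neg hd, if_neg hd]
        simp
    · rw [if_neg hlt]
      simp only [List.filter_cons, ih ht]
      by_cases hyk : (pvRowDate y == k) = true
      · rw [if_pos hyk, if_pos hyk]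
        simp
      · rw [if_neg hyk, if_neg hyk]

theorem pv_sorted_concat (xs : List (List (String × String))) (x : List (String × String)) :
    PySem.List.sorted (xs ++ [x]) (fun r => pvRowDate r) false
      = PySem.List.insertBy (fun a b => decide (pvRowDate a < pvRowDate b)) x
          (PySem.List.sorted xs (fun r => pvRowDate r) false) := by
  simp [PySem.List.sorted, List.foldl_append]

theorem pv_filter_sorted (L : List (List (String × String))) (k : String) :
    (PySem.List.sorted L (fun r => pvRowDate r) false).filter (fun r => pvRowDate r == k)
      = L.filter (fun r => pvRowDate r == k) := by
  induction L using List.reverseRecOn with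
  | nil => simp [PySem.List.sorted]
  | append_singleton xs x ih =>
    rw [pv_sorted_concat, pv_filter_insertBy x _ k (PySem.List.sorted_pairwise xs (fun r => pvRowDate r)), ih]
    rw [List.filter_append, List.filter_cons]
    split_ifs with hd <;> simp

theorem pvLastO_concat (xs : List (List (String × String))) (r : List (String × String)) (k : String) :
    pvLastO (xs ++ [r]) k = if pvRowDate r == k then some r else pvLastO xs k := by
  rw [pvLastO_append]
  simp only [pvLastO]
  split_ifs with hd <;> simp

theorem pvLastO_eq_filter (xs : List (List (String × String))) (k : String) :
    pvLastO xs k = (xs.filter (fun r => pvRowDate r == k)).getLast? := by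
  induction xs using List.reverseRecOn with
  | nil => simp [pvLastO]
  | append_singleton t r ih =>
    rw [pvLastO_concat, List.filter_append, List.filter_cons]
    split_ifs with hd
    · simp
    · simp [ih]

theorem pvLastO_sorted (L : List (List (String × String))) (k : String) :
    pvLastO (PySem.List.sorted L (fun r => pvRowDate r) false) k = pvLastO L k := by
  rw [pvLastO_eq_filter, pvLastO_eq_filter, pv_filter_sorted]

-- A's final dict's values are nodup (their dates are the nodup keys)
theorem pv_nodup_values_final (e n : List (List (String × String))) :
    (((pvOverwriteLastFive (pvBuildDict e) (pvBuildDict n) e).update (pvBuildDict n).items).values).Nodup := by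
  have hnd := pv_nodup_keys_final e n
  rw [PySem.Dict.values_eq_map_keys _ hnd []]
  apply List.Nodup.map_on ?_ hnd
  intro k1 h1 k2 h2 heq
  rcases hg1 : ((pvOverwriteLastFive (pvBuildDict e) (pvBuildDict n) e).update (pvBuildDict n).items).get? k1 with _ | v1
  · exact absurd h1 ((PySem.Dict.get?_eq_none_iff_not_mem_keys _ _).mp hg1)
  rcases hg2 : ((pvOverwriteLastFive (pvBuildDict e) (pvBuildDict n) e).update (pvBuildDict n).items).get? k2 with _ | v2
  · exact absurd h2 ((PySem.Dict.get?_eq_none_iff_not_mem_keys _ _).mp hg2)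
  have e1 : pvRowDate v1 = k1 := (pvLastO_mem (by rw [← pv_get?_final, hg1])).2
  have e2 : pvRowDate v2 = k2 := (pvLastO_mem (by rw [← pv_get?_final, hg2])).2
  rw [PySem.Dict.getD_eq_get?_getD, PySem.Dict.getD_eq_get?_getD, hg1, hg2] at heq
  simp only [Option.getD_some] at heq
  rw [← e1, ← e2, heq]

-- ===== VERDICT (by name: the statement is the Claim_ definition above) =====
theorem merge_incremental_spec : Claim_equal_merge_incremental := by
  intro e n _ _
  unfold Spec_merge_incremental merge_incremental merge_incremental_alt
  by_cases hn : n = []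
  · simp [hn]
  · rw [if_neg hn, if_neg hn]
    show PySem.List.sorted ((pvOverwriteLastFive (pvBuildDict e) (pvBuildDict n) e).update (pvBuildDict n).items).values (fun r => pvRowDate r) false
      = pvCollapse (PySem.List.sorted (e ++ n) (fun r => pvRowDate r) false)
    have hpw := PySem.List.sorted_pairwise (e ++ n) (fun r => pvRowDate r)
    apply PySem.List.sorted_eq_of_perm_of_pairwise_lt
    · apply (List.perm_ext_iff_of_nodup ?_ (pv_nodup_values_final e n)).mpr
      · intro v
        rw [pv_mem_collapse _ v hpw, pvLastO_sorted, pv_mem_values_final]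
      · exact ((pv_collapse_pairwise _ hpw).imp (fun h => fun he => absurd (he ▸ h) (lt_irrefl _)))
    · exact pv_collapse_pairwise _ hpw
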